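-- pv_equiv track=rewrite | github.com/openstax/content-copy-tool | content_util.py | prepare_role_updates
-- ===== SOURCE A (Python) =====
-- def prepare_role_updates(metadatafile, config):
--     """
--     Updates the roles on a module. This reads in from the settings file for
--     creator, maintainer, and rightsholder configuration.
--     """
--     creators = list(config['creators'])
--     rightsholders = list(config['rightsholders'])
--     maintainers = list(config['maintainers'])
--
--     if len(creators) == 1:
--         creator_string = '<dcterms:creator oerdc:id="'+creators[0]+'"'
--     else:
--         creator_string = '<dcterms:creator oerdc:id="'
--         for creator in creators[:-1]:
--             creator_string += creator+'" oerdc:email="useremail2@localhost.net" oerdc:pending="False">firstname2 lastname2</dcterms:creator>\n<dcterms:creator oerdc:id="'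
--         creator_string += creators[-1]+'"'
--     creator_tuple = ('<dcterms:creator oerdc:id=".*"', creator_string)
--
--     if len(maintainers) == 1:
--         maintainer_string = '<oerdc:maintainer oerdc:id="'+maintainers[0]+'"'
--     else:
--         maintainer_string = '<oerdc:maintainer oerdc:id="'
--         for maintainer in maintainers[:-1]:
--             maintainer_string += maintainer+'" oerdc:email="useremail2@localhost.net" oerdc:pending="False">firstname2 lastname2</oerdc:maintainer>\n<oerdc:maintainer oerdc:id="'
--         maintainer_string += maintainers[-1]+'"'
--     maintainer_tuple = ('<oerdc:maintainer oerdc:id=".*"', maintainer_string)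
--
--     if len(rightsholders) == 1:
--         rightholder_string = '<dcterms:rightsHolder oerdc:id="'+rightsholders[0]+'"'
--     else:
--         rightsholder_string = '<dcterms:rightsHolder oerdc:id="'
--         for rightsholder in rightsholders[:-1]:
--             rightsholder_string += rightsholder+'" oerdc:email="useremail2@localhost.net" oerdc:pending="False">firstname2 lastname2</dcterms:rightsHolder>\n<dcterms:rightsHolder oerdc:id="'
--         rightsholder_string += rightsholders[-1]+'"'
--     rightsholder_tuple = ('<dcterms:rightsHolder oerdc:id=".*"', rightsholder_string)
--
--     replace_map = [creator_tuple, maintainer_tuple, rightsholder_tuple]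
--     return replace_map
-- ===== SOURCE B (Python) =====
-- def prepare_role_updates(metadatafile, config):
--     """
--     Updates the roles on a module. This reads in from the settings file for
--     creator, maintainer, and rightsholder configuration.
--     """
--     def replacement(tag, ids):
--         sep = ('" oerdc:email="useremail2@localhost.net" oerdc:pending="False">'
--                'firstname2 lastname2</%s>\n<%s oerdc:id="' % (tag, tag))
--         return '<%s oerdc:id="%s"' % (tag, sep.join(ids))
--     return [('<%s oerdc:id=".*"' % tag, replacement(tag, list(config[key])))
--             for tag, key in (('dcterms:creator', 'creators'),
--                              ('oerdc:maintainer', 'maintainers'),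
--                              ('dcterms:rightsHolder', 'rightsholders'))]
-- ===== Notes on version B (the rewrite author's own statement) =====
-- stated objective: simpler
-- what changed: Replaces three copy-pasted if/loop blocks (which accumulate ids[:-1] plus a last-element special case, with a len==1 branch) by a single spec table of (tag, key) pairs and one helper that builds each replacement string with sep.join(ids).
import Mathlib
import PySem

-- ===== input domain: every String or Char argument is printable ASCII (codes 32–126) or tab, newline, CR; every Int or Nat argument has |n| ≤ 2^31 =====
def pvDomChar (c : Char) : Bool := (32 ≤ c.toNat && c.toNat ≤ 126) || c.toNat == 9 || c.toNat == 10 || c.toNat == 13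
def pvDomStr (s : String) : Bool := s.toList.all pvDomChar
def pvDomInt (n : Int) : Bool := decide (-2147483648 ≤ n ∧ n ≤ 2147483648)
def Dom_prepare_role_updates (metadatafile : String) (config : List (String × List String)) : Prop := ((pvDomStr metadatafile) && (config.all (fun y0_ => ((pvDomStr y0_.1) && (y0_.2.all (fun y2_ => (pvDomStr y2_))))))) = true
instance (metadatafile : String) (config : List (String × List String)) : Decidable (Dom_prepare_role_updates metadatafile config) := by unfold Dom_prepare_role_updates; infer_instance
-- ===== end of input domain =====

-- B factors the three duplicated role blocks into one spec table + a join-based helper; equal return value on Pre_, same cost.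

-- ===== PORT A =====
-- Literal transliteration of A. Where Python raises (KeyError on a missing key, IndexError on
-- creators[-1]/... of an empty list, UnboundLocalError in the len(rightsholders)==1 branch) the
-- port uses a .getD default / "" — all those inputs are excluded by Pre_prepare_role_updates.
def prepare_role_updates (metadatafile : String) (config : List (String × List String)) : List (String × String) :=
  let cfg := PySem.Dict.mk config
  let creators := (cfg.get? "creators").getD []          -- list(config['creators']); none = KeyError, outside Pre_
  let rightsholders := (cfg.get? "rightsholders").getD []
  let maintainers := (cfg.get? "maintainers").getD []
  let creator_string :=
    if creators.length = 1 then
      "<dcterms:creator oerdc:id=\"" ++ (PySem.List.pyGet? creators 0).getD "" ++ "\""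
    else
      ((PySem.List.slice creators none (some (-1))).foldl
        (fun acc creator => acc ++ (creator ++ "\" oerdc:email=\"useremail2@localhost.net\" oerdc:pending=\"False\">firstname2 lastname2</dcterms:creator>\n<dcterms:creator oerdc:id=\""))
        "<dcterms:creator oerdc:id=\"")
        ++ ((PySem.List.pyGet? creators (-1)).getD "" ++ "\"")   -- none = IndexError, outside Pre_
  let creator_tuple : String × String := ("<dcterms:creator oerdc:id=\".*\"", creator_string)
  let maintainer_string :=
    if maintainers.length = 1 then
      "<oerdc:maintainer oerdc:id=\"" ++ (PySem.List.pyGet? maintainers 0).getD "" ++ "\""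
    else
      ((PySem.List.slice maintainers none (some (-1))).foldl
        (fun acc maintainer => acc ++ (maintainer ++ "\" oerdc:email=\"useremail2@localhost.net\" oerdc:pending=\"False\">firstname2 lastname2</oerdc:maintainer>\n<oerdc:maintainer oerdc:id=\""))
        "<oerdc:maintainer oerdc:id=\"")
        ++ ((PySem.List.pyGet? maintainers (-1)).getD "" ++ "\"")
  let maintainer_tuple : String × String := ("<oerdc:maintainer oerdc:id=\".*\"", maintainer_string)
  let rightsholder_string :=
    if rightsholders.length = 1 then
      ""   -- Python assigns the misspelt 'rightholder_string' and then raises UnboundLocalError; outside Pre_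
    else
      ((PySem.List.slice rightsholders none (some (-1))).foldl
        (fun acc rightsholder => acc ++ (rightsholder ++ "\" oerdc:email=\"useremail2@localhost.net\" oerdc:pending=\"False\">firstname2 lastname2</dcterms:rightsHolder>\n<dcterms:rightsHolder oerdc:id=\""))
        "<dcterms:rightsHolder oerdc:id=\"")
        ++ ((PySem.List.pyGet? rightsholders (-1)).getD "" ++ "\"")
  let rightsholder_tuple : String × String := ("<dcterms:rightsHolder oerdc:id=\".*\"", rightsholder_string)
  [creator_tuple, maintainer_tuple, rightsholder_tuple]

-- ===== PORT B =====
def pvRoleSep (tag : String) : String :=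
  "\" oerdc:email=\"useremail2@localhost.net\" oerdc:pending=\"False\">firstname2 lastname2</"
    ++ tag ++ ">\n<" ++ tag ++ " oerdc:id=\""

def pvRoleReplacement (tag : String) (ids : List String) : String :=
  "<" ++ tag ++ " oerdc:id=\"" ++ PySem.Str.join (pvRoleSep tag) ids ++ "\""

def prepare_role_updates_alt (metadatafile : String) (config : List (String × List String)) : List (String × String) :=
  [("dcterms:creator", "creators"), ("oerdc:maintainer", "maintainers"),
   ("dcterms:rightsHolder", "rightsholders")].map
    (fun tk =>
      ("<" ++ tk.1 ++ " oerdc:id=\".*\"",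
       pvRoleReplacement tk.1 (((PySem.Dict.mk config).get? tk.2).getD [])))

-- ===== PRECONDITION & SPEC =====
-- Pre_ holds exactly where the Python A returns: it excludes only inputs on which A RAISES —
-- a missing 'creators'/'maintainers'/'rightsholders' key (KeyError), an empty role list
-- (IndexError on lst[-1]) and len(rightsholders)==1 (UnboundLocalError from the misspelt variable).
def Pre_prepare_role_updates (metadatafile : String) (config : List (String × List String)) : Prop :=
  ((PySem.Dict.mk config).get? "creators").getD [] ≠ [] ∧
  ((PySem.Dict.mk config).get? "maintainers").getD [] ≠ [] ∧
  ((PySem.Dict.mk config).get? "rightsholders").getD [] ≠ [] ∧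
  (((PySem.Dict.mk config).get? "rightsholders").getD []).length ≠ 1 ∧
  ((PySem.Dict.mk config).get? "creators").isSome ∧
  ((PySem.Dict.mk config).get? "maintainers").isSome ∧
  ((PySem.Dict.mk config).get? "rightsholders").isSome

instance (metadatafile : String) (config : List (String × List String)) : Decidable (Pre_prepare_role_updates metadatafile config) := by
  unfold Pre_prepare_role_updates; infer_instance

def pvWitness_prepare_role_updates : String × (List (String × List String)) :=
  ("m.xml", [("creators", ["a"]), ("maintainers", ["m1", "m2"]), ("rightsholders", ["r", "s"])])

def Spec_prepare_role_updates (metadatafile : String) (config : List (String × List String)) (out : List (String × String)) : Prop :=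
  out = prepare_role_updates_alt metadatafile config

instance (metadatafile : String) (config : List (String × List String)) (out : List (String × String)) : Decidable (Spec_prepare_role_updates metadatafile config out) := by
  unfold Spec_prepare_role_updates; infer_instance

-- ===== CLAIM =====
def Claim_equal_prepare_role_updates : Prop :=
  ∀ (metadatafile : String) (config : List (String × List String)),
    Dom_prepare_role_updates metadatafile config →
    Pre_prepare_role_updates metadatafile config →
    Spec_prepare_role_updates metadatafile config (prepare_role_updates metadatafile config)

-- ===== LEMMAS AND PROOFS =====

-- A's accumulation loop over l[:-1] followed by 'l[-1] + q' equals prefix + sep.join(l) + q.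
lemma pvChainEq (sep q : String) :
    ∀ (l : List String), l ≠ [] → ∀ acc : String,
      l.dropLast.foldl (fun a c => a ++ (c ++ sep)) acc
        ++ ((PySem.List.pyGet? l (-1)).getD "" ++ q)
      = acc ++ (PySem.Str.join sep l ++ q) := by
  intro l
  induction l with
  | nil => intro h; exact absurd rfl h
  | cons a t ih =>
    intro _ acc
    cases t with
    | nil =>
      simp [PySem.List.pyGet?_neg_one, PySem.Str.join, PySem.Chars.join_singleton]
    | cons b t' =>
      have hne : b :: t' ≠ [] := by simp
      have : PySem.List.pyGet? (a :: b :: t') (-1) = PySem.List.pyGet? (b :: t') (-1) := by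
        simp [PySem.List.pyGet?_neg_one, List.getLast?_cons_cons]
      rw [show (a :: b :: t').dropLast = a :: (b :: t').dropLast from rfl]
      simp only [List.foldl_cons, this]
      rw [ih hne (acc ++ (a ++ sep))]
      simp [PySem.Str.join, PySem.Chars.join_cons_cons, String.append_assoc]

-- the same with no trailing loop: a one-element list
lemma pvJoinSingleton (sep a : String) : PySem.Str.join sep [a] = a := by
  simp [PySem.Str.join, PySem.Chars.join_singleton]

theorem prepare_role_updates_spec : Claim_equal_prepare_role_updates := by
  intro metadatafile config _ hpre
  obtain ⟨hc, hm, hr, hr1, _, _, _⟩ := hpre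
  unfold Spec_prepare_role_updates prepare_role_updates prepare_role_updates_alt
    pvRoleReplacement pvRoleSep
  simp only [List.map_cons, List.map_nil]
  set c := ((PySem.Dict.mk config).get? "creators").getD [] with hcdef
  set m := ((PySem.Dict.mk config).get? "maintainers").getD [] with hmdef
  set r := ((PySem.Dict.mk config).get? "rightsholders").getD [] with hrdef
  have hrlen : ¬ r.length = 1 := hr1
  simp only [List.cons.injEq, Prod.mk.injEq, and_true]
  and_intros <;> try rfl
  · -- creators string
    by_cases h1 : c.length = 1
    · obtain ⟨x, hx⟩ : ∃ x, c = [x] := List.length_eq_one_iff.mp h1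
      simp [hx, pvJoinSingleton, String.append_assoc]
    · simp only [h1, if_false]
      rw [PySem.List.slice_to_neg_one, pvChainEq _ _ c hc]
      simp [String.append_assoc]
  · -- maintainers string
    by_cases h1 : m.length = 1
    · obtain ⟨x, hx⟩ : ∃ x, m = [x] := List.length_eq_one_iff.mp h1
      simp [hx, pvJoinSingleton, String.append_assoc]
    · simp only [h1, if_false]
      rw [PySem.List.slice_to_neg_one, pvChainEq _ _ m hm]
      simp [String.append_assoc]
  · -- rightsholders string
    simp only [hrlen, if_false]
    rw [PySem.List.slice_to_neg_one, pvChainEq _ _ r hr]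
    simp [String.append_assoc]
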